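-- pv_equiv track=rewrite | github.com/crolvlee/Algorithm | 프로그래머스/1/135808. 과일 장수/과일 장수.py | solution
-- ===== SOURCE A (Python) =====
-- def solution(k, m, score):
--     box_cnt = len(score) // m
--     rest_cnt = len(score) % m
--
--     score.sort()
--     new_score = score[rest_cnt:]
--
--     small_sum = 0
--     for i in range(len(new_score)):
--         if i % m == 0:
--             small_sum += new_score[i]
--
--
--     answer = small_sum * m
--     return answer
-- ===== SOURCE B (Python) =====
-- def solution(k, m, score):
--     # Histogram of values, then walk the distinct values in ascending order,
--     # counting arithmetically how many box minima fall inside each value's run.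
--     counts = {}
--     for v in score:
--         counts[v] = counts.get(v, 0) + 1
--     total = 0
--     pos = 0
--     nxt = len(score) % m  # next sorted index that is a box minimum
--     for v in sorted(counts):
--         c = counts[v]
--         end = pos + c
--         if nxt < end:
--             cnt = (end - 1 - nxt) // m + 1
--             total += v * cnt
--             nxt += cnt * m
--         pos = end
--     return total * m
-- ===== Notes on version B (the rewrite author's own statement) =====
-- stated objective: alternative
-- what changed: B never builds or strides the fully sorted list: it builds a value histogram (dict), iterates only the distinct values in ascending order, and for each value's run computes arithmetically how many box minima fall inside it ((end-1-nxt)//m+1), so after the O(n) histogram the work is O(d log d) in the number d of distinct values instead of O(n log n).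
-- outside the precondition, e.g. on solution(0, 0, [1]): A raises ZeroDivisionError, B raises ZeroDivisionError; on solution(0, -3, [1]): A returns -3, B returns 0; on solution(0, -2, [4, 7, 1]): A returns -14, B returns 14
import Mathlib
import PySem

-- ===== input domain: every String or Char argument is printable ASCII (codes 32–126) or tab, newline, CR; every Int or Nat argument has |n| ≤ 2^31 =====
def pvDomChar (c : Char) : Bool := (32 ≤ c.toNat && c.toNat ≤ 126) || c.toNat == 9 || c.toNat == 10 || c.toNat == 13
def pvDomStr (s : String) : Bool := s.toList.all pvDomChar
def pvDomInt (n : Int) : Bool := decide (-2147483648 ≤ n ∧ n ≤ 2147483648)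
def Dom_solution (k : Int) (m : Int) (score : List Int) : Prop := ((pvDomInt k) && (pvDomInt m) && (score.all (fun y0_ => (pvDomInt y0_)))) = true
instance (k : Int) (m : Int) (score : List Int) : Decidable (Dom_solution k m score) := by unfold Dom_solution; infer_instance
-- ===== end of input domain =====

-- B replaces A's sort-the-whole-list-and-stride by a value histogram: it counts occurrences in a
-- dict, walks the distinct values in ascending order, and counts arithmetically how many box
-- minima fall inside each value's run (objective: alternative). A sorts `score` in place
-- (observable mutation; B does not mutate); the equivalence proved is about the return value only.


-- ===== PORT A =====
def solution (k : Int) (m : Int) (score : List Int) : Int :=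
  let _box_cnt := PySem.Int.floordiv (PySem.List.len score) m
  let rest_cnt := PySem.Int.mod (PySem.List.len score) m
  let sorted := PySem.List.sorted score (fun x => x) false
  let new_score := PySem.List.slice sorted (some rest_cnt) none
  let small_sum := (PySem.List.pyRange 0 (PySem.List.len new_score) 1).foldl
      (fun acc i => if PySem.Int.mod i m = 0 then acc + PySem.List.pyGetD new_score i 0 else acc) 0
  small_sum * m

-- ===== PORT B =====
-- the body of Source B's `for v in sorted(counts)` loop, on state (total, pos, nxt)
def bStep (m : Int) (g : Int → Int) (st : Int × Int × Int) (v : Int) : Int × Int × Int :=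
  let c := g v
  let e := st.2.1 + c
  if st.2.2 < e then
    let cnt := PySem.Int.floordiv (e - 1 - st.2.2) m + 1
    (st.1 + v * cnt, e, st.2.2 + cnt * m)
  else (st.1, e, st.2.2)

def solution_alt (k : Int) (m : Int) (score : List Int) : Int :=
  let counts := score.foldl
    (fun d v => PySem.Dict.insert d v (PySem.Dict.getD d v 0 + 1)) (PySem.Dict.empty)
  ((PySem.List.sorted (PySem.Dict.keys counts) (fun x => x) false).foldl
      (bStep m (fun v => PySem.Dict.getD counts v 0))
      (0, 0, PySem.Int.mod (PySem.List.len score) m)).1 * m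

-- ===== PRECONDITION & SPEC =====
-- Pre_ restricts to m ≥ 1, the natural domain of a box size: at m = 0 A raises ZeroDivisionError,
-- and for m < 0 A's returned value is an accident of Python's negative floor-division and slice
-- wraparound, which B's arithmetic does not reproduce.
def Pre_solution (k : Int) (m : Int) (score : List Int) : Prop := 1 ≤ m
instance (k : Int) (m : Int) (score : List Int) : Decidable (Pre_solution k m score) := by unfold Pre_solution; infer_instance
def pvWitness_solution : Int × Int × List Int := (5, 3, [1, 2, 3, 1])

def Spec_solution (k : Int) (m : Int) (score : List Int) (out : Int) : Prop := out = solution_alt k m score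
instance (k : Int) (m : Int) (score : List Int) (out : Int) : Decidable (Spec_solution k m score out) := by unfold Spec_solution; infer_instance

-- ===== CLAIM (what is proved, stated in full; the proofs are below) =====
def Claim_equal_solution : Prop := ∀ (k : Int) (m : Int) (score : List Int), Dom_solution k m score → Pre_solution k m score → Spec_solution k m score (solution k m score)

-- ===== LEMMAS AND PROOFS =====

-- every m-th element starting at the head: x, then recurse after dropping mn more (step = mn + 1)
def pick (mn : Nat) : List Int → Int
  | [] => 0
  | x :: t => x + pick mn (t.drop mn)
termination_by l => l.length
decreasing_by simp

lemma pick_nil (mn : Nat) : pick mn [] = 0 := by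
  conv_lhs => unfold pick

lemma pick_cons (mn : Nat) (x : Int) (t : List Int) :
    pick mn (x :: t) = x + pick mn (t.drop mn) := by
  conv_lhs => unfold pick

lemma foldl_if_add (p : Int → Prop) [DecidablePred p] (v : Int → Int) :
    ∀ (l : List Int) (init : Int),
      l.foldl (fun acc i => if p i then acc + v i else acc) init
        = init + (l.map (fun i => if p i then v i else 0)).sum := by
  intro l
  induction l with
  | nil => simp
  | cons x t ih =>
    intro init
    simp only [List.foldl_cons, List.map_cons, List.sum_cons, ih]
    split_ifs <;> ring

def S (m : Int) (t : List Int) : Int :=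
  ((List.range t.length).map (fun (k : Nat) => if PySem.Int.mod ((k : Nat) : Int) m = 0 then t.getD k 0 else 0)).sum

lemma mod_pos_ne_zero (m : Int) (hm : 1 ≤ m) (k : Nat) (h0 : 0 < k) (hk : (k : Int) < m) :
    PySem.Int.mod (k : Int) m ≠ 0 := by
  rw [PySem.Int.mod_eq_emod_of_pos (by omega), Int.emod_eq_of_lt (by omega) (by omega)]
  omega

lemma S_eq_pick (m : Int) (hm : 1 ≤ m) : ∀ (t : List Int), S m t = pick (m.toNat - 1) t := by
  suffices h : ∀ (n : Nat) (t : List Int), t.length = n → S m t = pick (m.toNat - 1) t by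
    intro t; exact h t.length t rfl
  intro n
  induction n using Nat.strong_induction_on with
  | _ n ih =>
    intro t hlen
    match t with
    | [] => simp [S, pick_nil]
    | x :: u =>
      have hmn : 1 ≤ m.toNat := by omega
      by_cases hcase : (x :: u).length ≤ m.toNat
      · -- the whole list is one (possibly partial) block: only k = 0 contributes
        have hdrop : (x :: u).drop m.toNat = [] := List.drop_eq_nil_of_le hcase
        have hpick : pick (m.toNat - 1) (x :: u) = x := by
          have h1 : u.drop (m.toNat - 1) = [] := by
            apply List.drop_eq_nil_of_le; simp at hcase; omega
          rw [pick_cons, h1, pick_nil, add_zero]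
        rw [hpick]
        unfold S
        simp only [List.length_cons, List.range_succ_eq_map]
        simp only [List.map_cons, List.sum_cons, List.map_map]
        have h0 : PySem.Int.mod ((0 : Nat) : Int) m = 0 := by
          rw [PySem.Int.mod_eq_emod_of_pos (by omega)]; simp
        rw [if_pos (by exact_mod_cast h0)]
        have hz : ((List.range u.length).map ((fun (k : Nat) => if PySem.Int.mod ((k : Nat) : Int) m = 0 then (x :: u).getD k 0 else 0) ∘ Nat.succ)).sum = 0 := by
          apply List.sum_eq_zero
          intro y hy
          simp only [List.mem_map, List.mem_range, Function.comp] at hy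
          obtain ⟨j, hj, hyeq⟩ := hy
          rw [if_neg] at hyeq
          · exact hyeq.symm
          · exact mod_pos_ne_zero m hm (j + 1) (by omega) (by push_cast; simp at hcase; omega)
        rw [hz]
        simp [List.getD_cons_zero]
      · -- at least one full block: split the range at m.toNat and recurse on the dropped list
        push_neg at hcase
        have hsplit : (x :: u).length = m.toNat + ((x :: u).length - m.toNat) := by omega
        unfold S
        rw [hsplit, List.range_add, List.map_append, List.sum_append]
        have hfirst : ((List.range m.toNat).map (fun (k : Nat) => if PySem.Int.mod ((k : Nat) : Int) m = 0 then (x :: u).getD k 0 else 0)).sum = x := by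
          have : m.toNat = (m.toNat - 1) + 1 := by omega
          rw [this, List.range_succ_eq_map]
          simp only [List.map_cons, List.sum_cons, List.map_map]
          have h0 : PySem.Int.mod ((0 : Nat) : Int) m = 0 := by
            rw [PySem.Int.mod_eq_emod_of_pos (by omega)]; simp
          rw [if_pos (by exact_mod_cast h0)]
          have hz : ((List.range (m.toNat - 1)).map ((fun (k : Nat) => if PySem.Int.mod ((k : Nat) : Int) m = 0 then (x :: u).getD k 0 else 0) ∘ Nat.succ)).sum = 0 := by
            apply List.sum_eq_zero
            intro y hy
            simp only [List.mem_map, List.mem_range, Function.comp] at hy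
            obtain ⟨j, hj, hyeq⟩ := hy
            rw [if_neg] at hyeq
            · exact hyeq.symm
            · exact mod_pos_ne_zero m hm (j + 1) (by omega) (by push_cast; omega)
          rw [hz]
          simp [List.getD_cons_zero]
        have hsecond : ((List.map (fun k => m.toNat + k) (List.range ((x :: u).length - m.toNat))).map (fun (k : Nat) => if PySem.Int.mod ((k : Nat) : Int) m = 0 then (x :: u).getD k 0 else 0)).sum = S m ((x :: u).drop m.toNat) := by
          unfold S
          rw [List.length_drop, List.map_map]
          congr 1
          apply List.map_congr_left
          intro j _
          simp only [Function.comp]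
          have hcond : (PySem.Int.mod ((m.toNat + j : Nat) : Int) m = 0) ↔ (PySem.Int.mod (j : Int) m = 0) := by
            rw [PySem.Int.mod_eq_emod_of_pos (by omega), PySem.Int.mod_eq_emod_of_pos (by omega)]
            have hc : ((m.toNat + j : Nat) : Int) = m + (j : Int) := by push_cast; omega
            rw [hc, Int.add_emod_left]
          have hval : (x :: u).getD (m.toNat + j) 0 = ((x :: u).drop m.toNat).getD j 0 := by
            simp [List.getD_eq_getElem?_getD, List.getElem?_drop]
          rw [if_congr hcond hval rfl]
        rw [hfirst, hsecond]
        have hrec : S m ((x :: u).drop m.toNat) = pick (m.toNat - 1) ((x :: u).drop m.toNat) := by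
          apply ih (((x :: u).drop m.toNat).length) _ _ rfl
          simp only [List.length_drop]
          omega
        rw [hrec, pick_cons]
        congr 1
        have : (x :: u).drop m.toNat = u.drop (m.toNat - 1) := by
          have : m.toNat = (m.toNat - 1) + 1 := by omega
          rw [this]; rfl
        rw [this]

-- q < (q // m + 1) * m for 0 < m  (the next multiple bound behind B's `cnt`)
lemma lt_succ_ediv_mul (m q : Int) (hm : 1 ≤ m) : q < (q / m + 1) * m := by
  have h1 : m * (q / m) + q % m = q := Int.ediv_add_emod q m
  have h2 : q % m < m := Int.emod_lt_of_pos q (by omega)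
  have h3 : (q / m + 1) * m = m * (q / m) + m := by ring
  omega

-- picking every m-th element out of a run of c copies of v starting d into the run:
-- it contributes v times ⌊(c-1-d)/m⌋+1 picks and leaves the next pick (that far past the run) in rest
lemma pickrep (m : Int) (hm : 1 ≤ m) (v : Int) :
    ∀ (fuel : Nat) (c d : Int) (rest : List Int), 0 ≤ d → d < c → (c - d).toNat ≤ fuel →
      pick (m.toNat - 1) ((List.replicate c.toNat v ++ rest).drop d.toNat)
        = v * (PySem.Int.floordiv (c - 1 - d) m + 1)
          + pick (m.toNat - 1) (rest.drop (d + (PySem.Int.floordiv (c - 1 - d) m + 1) * m - c).toNat) := by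
  intro fuel
  induction fuel with
  | zero => intro c d rest h0 hdc hf; omega
  | succ f ih =>
    intro c d rest h0 hdc hf
    have hdrop1 : (List.replicate c.toNat v ++ rest).drop d.toNat
        = v :: (List.replicate c.toNat v ++ rest).drop (d.toNat + 1) := by
      rw [List.drop_append, List.drop_replicate, List.drop_append, List.drop_replicate]
      simp only [List.length_replicate]
      rw [show d.toNat - c.toNat = 0 by omega, show d.toNat + 1 - c.toNat = 0 by omega,
        show c.toNat - d.toNat = (c.toNat - (d.toNat + 1)) + 1 by omega, List.replicate_succ]
      rfl
    rw [hdrop1, pick_cons, List.drop_drop]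
    rw [show d.toNat + 1 + (m.toNat - 1) = (d + m).toNat by omega]
    by_cases hlt : d + m < c
    · -- another pick lands inside the run
      have hstep : PySem.Int.floordiv (c - 1 - d) m = PySem.Int.floordiv (c - 1 - (d + m)) m + 1 := by
        rw [PySem.Int.floordiv_eq_ediv_of_pos (by omega), PySem.Int.floordiv_eq_ediv_of_pos (by omega)]
        have h4 : c - 1 - d = (c - 1 - (d + m)) + 1 * m := by ring
        rw [h4, Int.add_mul_ediv_right _ _ (by omega : m ≠ 0)]
      rw [ih c (d + m) rest (by omega) hlt (by omega), hstep]
      have h5 : d + m + (PySem.Int.floordiv (c - 1 - (d + m)) m + 1) * m - c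
          = d + (PySem.Int.floordiv (c - 1 - (d + m)) m + 1 + 1) * m - c := by ring
      rw [h5]; ring
    · -- last pick of the run: the next pick index leaves the run
      have hz : PySem.Int.floordiv (c - 1 - d) m = 0 := by
        rw [PySem.Int.floordiv_eq_ediv_of_pos (by omega)]
        exact Int.ediv_eq_zero_of_lt (by omega) (by omega)
      rw [hz]
      have h6 : (List.replicate c.toNat v ++ rest).drop (d + m).toNat
          = rest.drop (d + (0 + 1) * m - c).toNat := by
        rw [List.drop_append, List.drop_replicate]
        simp only [List.length_replicate]
        rw [show c.toNat - (d + m).toNat = 0 by omega, show (d + m).toNat - c.toNat = (d + (0 + 1) * m - c).toNat by omega]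
        simp
      rw [h6]; ring

-- Source B's loop over the distinct values equals picking every m-th element of the flattened runs
lemma bfold (m : Int) (hm : 1 ≤ m) (g : Int → Int) (hg : ∀ v, 0 ≤ g v) :
    ∀ (ws : List Int) (total pos nxt : Int), pos ≤ nxt →
      (ws.foldl (bStep m g) (total, pos, nxt)).1
        = total + pick (m.toNat - 1)
            ((ws.flatMap (fun v => List.replicate (g v).toNat v)).drop (nxt - pos).toNat) := by
  intro ws
  induction ws with
  | nil => intro total pos nxt h; simp [pick_nil]
  | cons v ws ih =>
    intro total pos nxt hpn
    rw [List.foldl_cons, List.flatMap_cons]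
    by_cases hbr : nxt < pos + g v
    · -- the run contains at least one pick
      have hstep : bStep m g (total, pos, nxt) v
          = (total + v * (PySem.Int.floordiv (pos + g v - 1 - nxt) m + 1), pos + g v,
             nxt + (PySem.Int.floordiv (pos + g v - 1 - nxt) m + 1) * m) := by
        simp only [bStep, if_pos hbr]
      rw [hstep]
      set cnt := PySem.Int.floordiv (pos + g v - 1 - nxt) m + 1 with hcnt
      have hbound : pos + g v - 1 - nxt < cnt * m := by
        rw [hcnt, PySem.Int.floordiv_eq_ediv_of_pos (by omega)]
        exact lt_succ_ediv_mul m _ hm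
      rw [ih (total + v * cnt) (pos + g v) (nxt + cnt * m) (by omega)]
      have heq : PySem.Int.floordiv (g v - 1 - (nxt - pos)) m = PySem.Int.floordiv (pos + g v - 1 - nxt) m := by
        congr 1; ring
      have hrep := pickrep m hm v (g v - (nxt - pos)).toNat (g v) (nxt - pos)
        (ws.flatMap (fun v => List.replicate (g v).toNat v)) (by omega) (by omega) (by omega)
      rw [heq] at hrep
      rw [show (g v).toNat = ((g v : Int)).toNat from rfl] at hrep
      rw [hrep]
      have hix : nxt - pos + cnt * m - g v = nxt + cnt * m - (pos + g v) := by ring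
      rw [hix]; ring
    · -- the whole run is skipped: pos advances past it, no pick inside
      have hstep : bStep m g (total, pos, nxt) v = (total, pos + g v, nxt) := by
        simp only [bStep, if_neg hbr]
      rw [hstep, ih total (pos + g v) nxt (by omega)]
      congr 2
      have hgv := hg v
      rw [List.drop_append, List.drop_replicate]
      simp only [List.length_replicate]
      rw [show (g v).toNat - (nxt - pos).toNat = 0 by omega,
        show (nxt - pos).toNat - (g v).toNat = (nxt - (pos + g v)).toNat by omega]
      rfl

-- Σ over a nodup list of an 'if x = a' sum has the single matching term
lemma sum_ite_eq_of_nodup (a : Int) (g : Int → Nat) :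
    ∀ (l : List Int), l.Nodup →
      (l.map (fun x => if a = x then g x else 0)).sum = if a ∈ l then g a else 0 := by
  intro l
  induction l with
  | nil => simp
  | cons x t ih =>
    intro hnd
    simp only [List.map_cons, List.sum_cons, List.nodup_cons] at *
    rw [ih hnd.2]
    by_cases hax : a = x
    · subst hax
      simp [hnd.1]
    · simp [hax, List.mem_cons]

-- sorting the list = concatenating, over the sorted distinct values, a run per value
lemma sorted_eq_flat_runs (score : List Int) :
    PySem.List.sorted score (fun x => x) false
      = (PySem.List.sorted (PySem.Set.ofList score) (fun x => x) false).flatMap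
          (fun v => List.replicate (score.count v) v) := by
  have hlt : (PySem.List.sorted (PySem.Set.ofList score) (fun x => x) false).Pairwise (· < ·) :=
    PySem.List.sorted_ofList_pairwise_lt score
  have hnd : (PySem.List.sorted (PySem.Set.ofList score) (fun x => x) false).Nodup :=
    hlt.imp (fun h => ne_of_lt h)
  have hmem : ∀ a, a ∈ PySem.List.sorted (PySem.Set.ofList score) (fun x => x) false ↔ a ∈ score := by
    intro a
    rw [PySem.List.mem_sorted, PySem.Set.mem_ofList]
  apply PySem.List.sorted_id_eq_of_perm_of_pairwise
  · -- permutation: equal counts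
    rw [List.perm_iff_count]
    intro a
    have hcnt : ∀ (l : List Int) (f : Int → List Int), (l.flatMap f).count a = (l.map fun x => (f x).count a).sum := by
      intro l f
      induction l with
      | nil => simp
      | cons x t ih => simp [List.flatMap_cons, List.count_append, ih]
    rw [hcnt]
    have hmapeq : ((PySem.List.sorted (PySem.Set.ofList score) (fun x => x) false).map
          fun x => (List.replicate (score.count x) x).count a)
        = (PySem.List.sorted (PySem.Set.ofList score) (fun x => x) false).map
          fun x => if a = x then score.count x else 0 := by
      apply List.map_congr_left
      intro x _
      rw [List.count_replicate]
      simp only [beq_iff_eq]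
      exact if_congr eq_comm rfl rfl
    rw [hmapeq, sum_ite_eq_of_nodup a _ _ hnd]
    by_cases ha : a ∈ score
    · rw [if_pos ((hmem a).mpr ha)]
    · rw [if_neg (fun h => ha ((hmem a).mp h)), List.count_eq_zero_of_not_mem ha]
  · -- sortedness of the concatenated runs
    rw [List.pairwise_flatMap]
    constructor
    · intro v _
      exact List.pairwise_replicate.mpr (Or.inr (le_refl v))
    · apply hlt.imp
      intro a b hab x hx y hy
      rw [List.eq_of_mem_replicate hx, List.eq_of_mem_replicate hy]
      exact le_of_lt hab

-- ===== VERDICT (by name: the statement is the Claim_ definition above) =====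
theorem solution_spec : Claim_equal_solution := by
  intro k m score _hdom hpre
  have hm : 1 ≤ m := hpre
  unfold Spec_solution solution solution_alt
  simp only [PySem.List.len_eq, PySem.Dict.foldl_insert_getD_add_one_eq_counter]
  set s := PySem.List.sorted score (fun x => x) false with hs
  have hrest0 : (0 : Int) ≤ PySem.Int.mod (score.length : Int) m :=
    PySem.Int.mod_nonneg _ (by omega)
  -- A's suffix slice is a drop
  have hslice : PySem.List.slice s (some (PySem.Int.mod (score.length : Int) m)) none
      = s.drop (PySem.Int.mod (score.length : Int) m).toNat :=
    PySem.List.slice_from s hrest0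
  rw [hslice]
  set t := s.drop (PySem.Int.mod (score.length : Int) m).toNat with ht
  -- A's filtered index loop is S m t
  have hA : (PySem.List.pyRange 0 (t.length : Int) 1).foldl
      (fun acc i => if PySem.Int.mod i m = 0 then acc + PySem.List.pyGetD t i 0 else acc) 0
      = S m t := by
    rw [foldl_if_add (fun i => PySem.Int.mod i m = 0) (fun i => PySem.List.pyGetD t i 0),
      zero_add, PySem.List.pyRange_one, List.map_map]
    unfold S
    have hlen : (((t.length : Int)) - 0).toNat = t.length := by omega
    rw [hlen]
    apply congrArg
    apply List.map_congr_left
    intro j _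
    simp [Function.comp]
  rw [hA, S_eq_pick m hm t]
  -- B's histogram walk is the same pick over the flattened runs
  have hg : ∀ v, (0 : Int) ≤ PySem.Dict.getD (PySem.Dict.counter score) v 0 := by
    intro v
    rw [PySem.Dict.getD_counter]
    exact_mod_cast Nat.zero_le _
  rw [PySem.Dict.keys_counter,
    bfold m hm (fun v => PySem.Dict.getD (PySem.Dict.counter score) v 0) hg _ 0 0
      (PySem.Int.mod (score.length : Int) m) hrest0]
  have hflat : ((PySem.List.sorted (PySem.Set.ofList score) (fun x => x) false).flatMap
        (fun v => List.replicate (PySem.Dict.getD (PySem.Dict.counter score) v 0).toNat v)) = s := by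
    rw [hs, sorted_eq_flat_runs score]
    congr 1
    funext v
    rw [PySem.Dict.getD_counter, Int.toNat_natCast]
  rw [hflat, zero_add, sub_zero, ht]
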